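-- pv_equiv track=rewrite | github.com/dmeim/clickclack | public/scripts/filter_words.py | filter_word_list
-- ===== SOURCE A (Python) =====
-- def should_filter_word(word, filter_words):
--     """Check if word should be filtered (case-insensitive, including plurals)."""
--     word_lower = word.lower()
--
--     # Check exact match
--     if word_lower in filter_words:
--         return True
--
--     # Check plural forms
--     if word_lower.endswith('s'):
--         singular = word_lower[:-1]
--         if singular in filter_words:
--             return True
--
--     # Check if singular form should be filtered (for words ending in 'y' -> 'ies')
--     if word_lower.endswith('ies'):
--         singular = word_lower[:-3] + 'y'
--         if singular in filter_words:
--             return True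
--
--     # Check if singular form should be filtered (for words ending in 'es')
--     if word_lower.endswith('es'):
--         singular = word_lower[:-2]
--         if singular in filter_words:
--             return True
--
--     return False
--
-- def filter_word_list(word_list, filter_words):
--     """Filter out inappropriate words from word list."""
--     filtered_list = []
--     removed_count = 0
--     removed_words = []
--
--     for word in word_list:
--         if should_filter_word(word, filter_words):
--             removed_count += 1
--             removed_words.append(word)
--         else:
--             filtered_list.append(word)
--
--     return filtered_list, removed_count, removed_words
-- ===== SOURCE B (Python) =====
-- def _forms(f):
--     out = [f, f + 's', f + 'es']
--     if f.endswith('y'):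
--         out.append(f[:-1] + 'ies')
--     return out
--
-- def filter_word_list(word_list, filter_words):
--     """Filter out inappropriate words via a pre-expanded blacklist set."""
--     blacklist = set()
--     for f in filter_words:
--         blacklist.update(_forms(f))
--     filtered_list = []
--     removed_words = []
--     for word in word_list:
--         if word.lower() in blacklist:
--             removed_words.append(word)
--         else:
--             filtered_list.append(word)
--     return filtered_list, len(removed_words), removed_words
-- ===== Notes on version B (the rewrite author's own statement) =====
-- stated objective: alternative
-- what changed: B expands the blacklist once into a set of all forbidden surface forms (word, +s, +es, y->ies) and then decides each word by a single set-membership test, instead of A's per-word suffix-stripping with up to four scans of filter_words.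
import Mathlib
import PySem

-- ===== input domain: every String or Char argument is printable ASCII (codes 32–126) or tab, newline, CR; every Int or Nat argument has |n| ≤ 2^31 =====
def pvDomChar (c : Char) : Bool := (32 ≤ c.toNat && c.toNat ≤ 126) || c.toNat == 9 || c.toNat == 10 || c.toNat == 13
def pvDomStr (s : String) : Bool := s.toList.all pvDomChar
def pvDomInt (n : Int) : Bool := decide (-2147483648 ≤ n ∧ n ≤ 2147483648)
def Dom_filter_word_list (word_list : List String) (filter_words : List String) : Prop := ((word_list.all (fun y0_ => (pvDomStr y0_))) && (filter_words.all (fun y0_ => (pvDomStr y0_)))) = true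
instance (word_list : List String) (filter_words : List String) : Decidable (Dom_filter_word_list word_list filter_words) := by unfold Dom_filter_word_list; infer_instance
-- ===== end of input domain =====

-- B expands the blacklist once into a set of all forbidden surface forms (word, +s, +es, y->ies) and decides each word by one set-membership test instead of A's per-word suffix-stripping scans; return value proved equal.


-- ===== PORT A =====
def should_filter_word (word : String) (filter_words : List String) : Bool :=
  let word_lower := PySem.Str.lower word
  if filter_words.contains word_lower then true
  else if PySem.Str.endswith word_lower "s" &&
          filter_words.contains (PySem.Str.slice word_lower none (some (-1))) then true
  else if PySem.Str.endswith word_lower "ies" &&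
          filter_words.contains (PySem.Str.slice word_lower none (some (-3)) ++ "y") then true
  else if PySem.Str.endswith word_lower "es" &&
          filter_words.contains (PySem.Str.slice word_lower none (some (-2))) then true
  else false

def filter_word_list (word_list : List String) (filter_words : List String) : List String × Int × List String :=
  let r := word_list.foldl
    (fun (acc : List String × Int × List String) word =>
      if should_filter_word word filter_words then
        (acc.1, acc.2.1 + 1, acc.2.2 ++ [word])
      else
        (acc.1 ++ [word], acc.2.1, acc.2.2))
    ([], 0, [])
  r

-- ===== PORT B =====
def pvForms (f : String) : List String :=
  [f, f ++ "s", f ++ "es"] ++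
    (if PySem.Str.endswith f "y" then [PySem.Str.slice f none (some (-1)) ++ "ies"] else [])

def filter_word_list_alt (word_list : List String) (filter_words : List String) : List String × Int × List String :=
  let blacklist : PySem.Set String :=
    filter_words.foldl (fun s f => PySem.Set.update s (pvForms f)) PySem.Set.empty
  let p := word_list.foldl
    (fun (acc : List String × List String) word =>
      if PySem.Set.contains blacklist (PySem.Str.lower word) then
        (acc.1, acc.2 ++ [word])
      else
        (acc.1 ++ [word], acc.2))
    ([], [])
  (p.1, (p.2.length : Int), p.2)

-- ===== PRECONDITION & SPEC =====
def Spec_filter_word_list (word_list : List String) (filter_words : List String) (out : List String × Int × List String) : Prop := out = filter_word_list_alt word_list filter_words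
instance (word_list : List String) (filter_words : List String) (out : List String × Int × List String) : Decidable (Spec_filter_word_list word_list filter_words out) := by unfold Spec_filter_word_list; infer_instance

-- ===== CLAIM (what is proved, stated in full; the proofs are below) =====
def Claim_equal_filter_word_list : Prop := ∀ (word_list : List String) (filter_words : List String), Dom_filter_word_list word_list filter_words → Spec_filter_word_list word_list filter_words (filter_word_list word_list filter_words)

-- ===== LEMMAS AND PROOFS =====

-- `l` ends with `p` and stripping that suffix leaves `m`  ⟺  l = m ++ p
lemma pv_eq_append_iff (l m p : List Char) :
    (p <:+ l ∧ l.take (l.length - p.length) = m) ↔ l = m ++ p := by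
  constructor
  · rintro ⟨⟨t, rfl⟩, rfl⟩; simp
  · rintro rfl; exact ⟨List.suffix_append m p, by simp⟩

-- Python's  u[:-k]  (0 < k) is  take (len - k)
lemma pv_slice_neg (l : List Char) (k : Nat) (hk : 0 < k) :
    PySem.List.slice l none (some (-(k : Int))) = l.take (l.length - k) := by
  simp only [PySem.List.slice, PySem.List.clampIdx]
  rw [if_pos (by omega : -(k:Int) < 0)]
  by_cases h : (l.length : Int) + -(k:Int) < 0
  · rw [if_pos h]
    have h0 : l.length - k = 0 := by omega
    simp [h0]
  · rw [if_neg h]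
    have h1 : ((l.length : Int) + -(k:Int)).toNat - 0 = l.length - k := by omega
    simp [h1]

lemma pv_ew (u p : String) : PySem.Str.endswith u p = true ↔ p.toList <:+ u.toList := by
  simp [PySem.Chars.endswith_iff]

lemma pv_slice_str (u : String) (k : Nat) (hk : 0 < k) :
    (PySem.Str.slice u none (some (-(k : Int)))).toList = u.toList.take (u.toList.length - k) := by
  rw [PySem.Str.toList_slice]
  simp [pv_slice_neg _ _ hk]

-- A's "ends with p and the stripped prefix is f"  ⟺  u = f ++ p
lemma pv_strip_iff (u f p : String) (i : Int) (hi : i = -((p.toList.length : Nat) : Int))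
    (hp : 0 < p.toList.length) :
    (PySem.Str.endswith u p = true ∧ PySem.Str.slice u none (some i) = f) ↔ u = f ++ p := by
  subst hi
  rw [pv_ew, ← String.toList_inj, pv_slice_str u _ hp, ← String.toList_inj, String.toList_append]
  exact pv_eq_append_iff u.toList f.toList p.toList

-- strip p from u and glue q  ⟺  strip q from f and glue p  (the 'ies'/'y' exchange)
lemma pv_swap (u f p q : String) (i j : Int)
    (hi : i = -((p.toList.length : Nat) : Int)) (hj : j = -((q.toList.length : Nat) : Int))
    (hp : 0 < p.toList.length) (hq : 0 < q.toList.length) :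
    (PySem.Str.endswith u p = true ∧ PySem.Str.slice u none (some i) ++ q = f) ↔
      (PySem.Str.endswith f q = true ∧ PySem.Str.slice f none (some j) ++ p = u) := by
  subst hi; subst hj
  constructor
  · rintro ⟨h1, h2⟩
    obtain ⟨t, ht⟩ := (pv_ew u p).mp h1
    have hf : f.toList = t ++ q.toList := by
      rw [← h2, String.toList_append, pv_slice_str u _ hp, ← ht]
      simp
    constructor
    · rw [pv_ew, hf]; exact List.suffix_append t q.toList
    · rw [← String.toList_inj, String.toList_append, pv_slice_str f _ hq, hf]
      simp [← ht]
  · rintro ⟨h1, h2⟩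
    obtain ⟨t, ht⟩ := (pv_ew f q).mp h1
    have hu : u.toList = t ++ p.toList := by
      rw [← h2, String.toList_append, pv_slice_str f _ hq, ← ht]
      simp
    constructor
    · rw [pv_ew, hu]; exact List.suffix_append t p.toList
    · rw [← String.toList_inj, String.toList_append, pv_slice_str u _ hp, hu]
      simp [← ht]

-- membership in the expanded forms of one filter word ⟺ A's four checks against that word
lemma pv_mem_forms_iff (u f : String) :
    u ∈ pvForms f ↔
      (u = f ∨
        (PySem.Str.endswith u "s" = true ∧ PySem.Str.slice u none (some (-1)) = f) ∨
        (PySem.Str.endswith u "ies" = true ∧ PySem.Str.slice u none (some (-3)) ++ "y" = f) ∨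
        (PySem.Str.endswith u "es" = true ∧ PySem.Str.slice u none (some (-2)) = f)) := by
  rw [pv_strip_iff u f "s" (-1) (by decide) (by decide),
      pv_strip_iff u f "es" (-2) (by decide) (by decide),
      pv_swap u f "ies" "y" (-3) (-1) (by decide) (by decide) (by decide) (by decide)]
  by_cases hy : PySem.Str.endswith f "y" = true
  · simp only [pvForms, hy, if_pos, List.mem_append, List.mem_cons,
      List.not_mem_nil, or_false, true_and]
    constructor
    · rintro ((rfl | rfl | rfl) | h)
      · tauto
      · tauto
      · tauto
      · exact Or.inr (Or.inr (Or.inl h.symm))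
    · rintro (rfl | rfl | h | rfl)
      · tauto
      · tauto
      · exact Or.inr h.symm
      · tauto
  · rw [Bool.not_eq_true] at hy
    simp only [pvForms, hy, Bool.false_eq_true, if_false, List.mem_append, List.mem_cons,
      List.not_mem_nil, or_false, false_and, false_or]

lemma pv_mem_fold_aux (fw : List String) (s : PySem.Set String) (u : String) :
    (u ∈ fw.foldl (fun s f => PySem.Set.update s (pvForms f)) s) ↔
      (u ∈ s ∨ ∃ f ∈ fw, u ∈ pvForms f) := by
  induction fw generalizing s with
  | nil => simp
  | cons f fs ih =>
      simp only [List.foldl_cons, ih, PySem.Set.mem_update, List.mem_cons, or_and_right,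
        exists_or, exists_eq_left]
      tauto

-- A's per-word decision equals membership in B's expanded blacklist
lemma pv_should_eq_contains (w : String) (fw : List String) :
    should_filter_word w fw =
      PySem.Set.contains (fw.foldl (fun s f => PySem.Set.update s (pvForms f)) PySem.Set.empty)
        (PySem.Str.lower w) := by
  rw [Bool.eq_iff_iff, PySem.Set.contains_iff, pv_mem_fold_aux]
  simp only [should_filter_word, PySem.Set.empty, List.not_mem_nil, false_or]
  simp
  constructor
  · rintro (h | ⟨he, hm⟩ | ⟨he, hm⟩ | ⟨he, hm⟩)
    · exact ⟨_, h, (pv_mem_forms_iff _ _).mpr (Or.inl rfl)⟩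
    · exact ⟨_, hm, (pv_mem_forms_iff _ _).mpr (Or.inr (Or.inl ⟨by simpa using he, rfl⟩))⟩
    · exact ⟨_, hm, (pv_mem_forms_iff _ _).mpr (Or.inr (Or.inr (Or.inl ⟨by simpa using he, rfl⟩)))⟩
    · exact ⟨_, hm, (pv_mem_forms_iff _ _).mpr (Or.inr (Or.inr (Or.inr ⟨by simpa using he, rfl⟩)))⟩
  · rintro ⟨f, hf, hm⟩
    rcases (pv_mem_forms_iff _ _).mp hm with rfl | ⟨he, rfl⟩ | ⟨he, rfl⟩ | ⟨he, rfl⟩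
    · exact Or.inl hf
    · exact Or.inr (Or.inl ⟨by simpa using he, hf⟩)
    · exact Or.inr (Or.inr (Or.inl ⟨by simpa using he, hf⟩))
    · exact Or.inr (Or.inr (Or.inr ⟨by simpa using he, hf⟩))

-- the two partition loops agree, tracking count = length of removed
lemma pv_loop (wl fw : List String) (fl rm : List String) :
    wl.foldl
      (fun (acc : List String × Int × List String) word =>
        if should_filter_word word fw then (acc.1, acc.2.1 + 1, acc.2.2 ++ [word])
        else (acc.1 ++ [word], acc.2.1, acc.2.2))
      (fl, (rm.length : Int), rm) =
    ((fun (p : List String × List String) => (p.1, (p.2.length : Int), p.2))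
      (wl.foldl
        (fun (acc : List String × List String) word =>
          if PySem.Set.contains (fw.foldl (fun s f => PySem.Set.update s (pvForms f)) PySem.Set.empty)
              (PySem.Str.lower word) then (acc.1, acc.2 ++ [word])
          else (acc.1 ++ [word], acc.2))
        (fl, rm))) := by
  induction wl generalizing fl rm with
  | nil => simp
  | cons w ws ih =>
      simp only [List.foldl_cons, pv_should_eq_contains w fw]
      by_cases h : PySem.Set.contains (fw.foldl (fun s f => PySem.Set.update s (pvForms f)) PySem.Set.empty) (PySem.Str.lower w) = true
      · rw [if_pos h, if_pos h]
        have : ((rm.length : Int) + 1) = (((rm ++ [w]).length : Int)) := by simp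
        rw [this]; exact ih fl (rm ++ [w])
      · rw [if_neg h, if_neg h]
        exact ih (fl ++ [w]) rm

-- ===== VERDICT (by name: the statement is the Claim_ definition above) =====
theorem filter_word_list_spec : Claim_equal_filter_word_list := by
  intro wl fw _
  unfold Spec_filter_word_list filter_word_list filter_word_list_alt
  have := pv_loop wl fw [] []
  simpa using this
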